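-- pv_equiv track=rewrite | github.com/joqjoq966/Algorithm_python | Codeforces/Round #697/D.py | solve
-- ===== SOURCE A (Python) =====
-- def solve(n,m,c):
--     ans = 0
--     c = sorted(c,reverse = True)
--     free = 0
--     for i in range(n):
--         free += c[i][0]
--     if free < m:
--         return -1
--
--
--     return ans
-- ===== SOURCE B (Python) =====
-- def solve(n, m, c):
--     # Selection by repeated max-extraction: no sorting at all.
--     pool = [x[0] for x in c if x]
--     free = 0
--     for _ in range(n):
--         b = max(pool)
--         pool.remove(b)
--         free += b
--     return -1 if free < m else 0
-- ===== Notes on version B (the rewrite author's own statement) =====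
-- stated objective: alternative
-- what changed: B never sorts: it collects the heads of the non-empty rows and selects the n largest by repeated max-extraction (max + remove in a loop), summing as it goes, instead of A's full lexicographic sort of the row lists followed by an index loop.
import Mathlib
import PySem

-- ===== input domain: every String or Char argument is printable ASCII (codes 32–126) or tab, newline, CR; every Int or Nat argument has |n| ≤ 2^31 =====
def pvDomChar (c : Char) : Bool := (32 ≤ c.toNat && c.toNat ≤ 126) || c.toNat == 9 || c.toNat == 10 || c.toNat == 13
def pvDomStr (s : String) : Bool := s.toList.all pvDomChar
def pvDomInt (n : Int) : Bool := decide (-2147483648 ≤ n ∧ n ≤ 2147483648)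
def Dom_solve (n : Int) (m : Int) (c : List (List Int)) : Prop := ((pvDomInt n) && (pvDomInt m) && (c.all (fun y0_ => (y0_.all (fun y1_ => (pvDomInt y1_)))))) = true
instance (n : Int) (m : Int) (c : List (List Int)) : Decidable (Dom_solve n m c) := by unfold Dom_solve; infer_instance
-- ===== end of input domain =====

-- B never sorts: it selects the n largest heads of the non-empty rows by repeated
-- max-extraction (max + remove in a loop), instead of A's full lexicographic sort
-- of the rows followed by an indexing loop; objective: alternative.

-- ===== PORT A =====
-- ans = 0; c = sorted(c, reverse=True); free = 0
-- for i in range(n): free += c[i][0]      (indexing ported with pyGetD; Pre_ keeps it in range)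
-- if free < m: return -1
-- return ans
def solve (n : Int) (m : Int) (c : List (List Int)) : Int :=
  let ans : Int := 0
  let cs := PySem.List.sorted c (fun x => x) true
  let free := (PySem.List.pyRange 0 n 1).foldl
    (fun free i => free + PySem.List.pyGetD (PySem.List.pyGetD cs i []) 0 0) 0
  if free < m then -1 else ans

-- ===== PORT B =====
-- pool = [x[0] for x in c if x]; free = 0
-- for _ in range(n): b = max(pool); pool.remove(b); free += b
--   (max([]) raises ValueError; Pre_ keeps the pool non-empty during the loop,
--    so the .getD defaults are never reached on admitted inputs)
-- return -1 if free < m else 0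
def solve_alt (n : Int) (m : Int) (c : List (List Int)) : Int :=
  let pool0 := (c.filter (fun x => !x.isEmpty)).map (fun x => PySem.List.pyGetD x 0 0)
  let st := (PySem.List.pyRange 0 n 1).foldl
    (fun (st : Int × List Int) _ =>
      let b := (PySem.List.max? st.2 (fun y => y)).getD 0
      (st.1 + b, (PySem.List.remove? st.2 b).getD st.2)) (0, pool0)
  if st.1 < m then -1 else 0

-- ===== PRECONDITION & SPEC =====
-- Pre_ excludes exactly the inputs on which A raises IndexError: n larger than the
-- number of non-empty rows of c (then c[i] or c[i][0] fails for some i < n).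
def Pre_solve (n : Int) (m : Int) (c : List (List Int)) : Prop :=
  n ≤ ((c.filter (fun x => !x.isEmpty)).length : Int)
instance (n : Int) (m : Int) (c : List (List Int)) : Decidable (Pre_solve n m c) := by
  unfold Pre_solve; infer_instance
def pvWitness_solve : Int × Int × List (List Int) := (1, 3, [[2, 1], [5]])

def Spec_solve (n : Int) (m : Int) (c : List (List Int)) (out : Int) : Prop := out = solve_alt n m c
instance (n : Int) (m : Int) (c : List (List Int)) (out : Int) : Decidable (Spec_solve n m c out) := by unfold Spec_solve; infer_instance

-- ===== CLAIM (what is proved, stated in full; the proofs are below) =====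
def Claim_equal_solve : Prop := ∀ (n : Int) (m : Int) (c : List (List Int)), Dom_solve n m c → Pre_solve n m c → Spec_solve n m c (solve n m c)

-- ===== LEMMAS AND PROOFS =====

-- B's loop body, named for the proofs
def stepB (st : Int × List Int) : Int × List Int :=
  let b := (PySem.List.max? st.2 (fun y => y)).getD 0
  (st.1 + b, (PySem.List.remove? st.2 b).getD st.2)

-- a fold whose body ignores the element is an iterate
theorem foldl_const_iterate {α β : Type} (f : β → β) (l : List α) (st : β) :
    l.foldl (fun s _ => f s) st = f^[l.length] st := by
  induction l generalizing st with
  | nil => rfl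
  | cons x t ih => simp [List.foldl_cons, ih, Function.iterate_succ_apply]

-- the Decidable instance in `sorted` is irrelevant (the LT instances are defeq)
theorem sortedLL_bridge (xs : List (List Int)) (rev : Bool) :
    PySem.List.sorted xs (fun x => x) rev
      = @PySem.List.sorted (List Int) (List Int) _
          LinearOrder.toDecidableLT xs (fun x => x) rev := by
  congr 1

-- descending sort of rows is pairwise ≥ (core List order)
theorem sortedLL_pairwise_rev (xs : List (List Int)) :
    (PySem.List.sorted xs (fun x => x) true).Pairwise (fun a b => b ≤ a) := by
  rw [sortedLL_bridge]
  exact PySem.List.sorted_pairwise_rev xs (fun x => x)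

-- Uniqueness of the descending sort with identity key: any pairwise-≥ permutation is it.
theorem sorted_rev_id_unique {k : Type} [LinearOrder k] (xs ys : List k)
    (hp : ys.Perm xs) (hs : ys.Pairwise (fun a b => b ≤ a)) :
    PySem.List.sorted xs (fun x => x) true = ys :=
  List.Perm.eq_of_pairwise (le := fun a b => b ≤ a)
    (fun _ _ _ _ h1 h2 => le_antisymm h2 h1)
    (PySem.List.sorted_pairwise_rev xs (fun x => x)) hs
    ((PySem.List.sorted_perm xs (fun x => x) true).trans hp.symm)

-- row-list version, with the core List order in the hypothesis
theorem sortedLL_unique (xs ys : List (List Int))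
    (hp : ys.Perm xs) (hs : ys.Pairwise (fun a b => b ≤ a)) :
    PySem.List.sorted xs (fun x => x) true = ys := by
  rw [sortedLL_bridge]
  exact sorted_rev_id_unique xs ys hp hs

-- [] is below every list in the row order
theorem nilLE' (a : List Int) : ([] : List Int) ≤ a := by
  cases a with
  | nil => exact le_rfl
  | cons h t => exact le_of_lt (List.nil_lt_cons h t)

-- [] is ≤ every list, so the empty rows sort to the back: descending sort splits.
theorem sorted_rev_filter_split (c : List (List Int)) :
    PySem.List.sorted c (fun x => x) true =
      PySem.List.sorted (c.filter (fun x => !x.isEmpty)) (fun x => x) true ++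
        List.replicate (c.filter (fun x => x.isEmpty)).length [] := by
  have hrep : (c.filter (fun x => x.isEmpty)) =
      List.replicate (c.filter (fun x => x.isEmpty)).length ([] : List Int) := by
    rw [List.eq_replicate_iff]
    refine ⟨rfl, ?_⟩
    intro b hb
    have := (List.mem_filter.mp hb).2
    simpa [List.isEmpty_iff] using this
  apply sortedLL_unique
  · rw [← hrep]
    refine ((PySem.List.sorted_perm _ _ _).append_right _).trans ?_
    have h := List.filter_append_perm (fun x => !x.isEmpty) c
    simpa using h
  · rw [List.pairwise_append]
    refine ⟨sortedLL_pairwise_rev _, ?_, ?_⟩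
    · exact List.pairwise_replicate.mpr (Or.inr le_rfl)
    · intro a _ b hb
      rw [List.eq_of_mem_replicate hb]
      exact nilLE' a

-- first components of a descending chain of non-empty rows form a descending chain
theorem head_mono (x y : List Int) (hx : x ≠ []) (hy : y ≠ []) (h : y ≤ x) :
    PySem.List.pyGetD y 0 0 ≤ PySem.List.pyGetD x 0 0 := by
  obtain ⟨a, xs', rfl⟩ := List.exists_cons_of_ne_nil hx
  obtain ⟨b, ys', rfl⟩ := List.exists_cons_of_ne_nil hy
  have hx0 : PySem.List.pyGetD (a :: xs') 0 0 = a := by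
    simp [PySem.List.pyGetD, PySem.List.pyGet?, PySem.List.pyIdx?]
  have hy0 : PySem.List.pyGetD (b :: ys') 0 0 = b := by
    simp [PySem.List.pyGetD, PySem.List.pyGet?, PySem.List.pyIdx?]
  rw [hx0, hy0]
  rcases h.lt_or_eq with hlt | heq
  · rcases List.cons_lt_cons_iff.mp hlt with h1 | ⟨h1, _⟩
    · exact le_of_lt h1
    · exact le_of_eq h1
  · exact le_of_eq (by injection heq)

-- the first components of the lexicographically descending-sorted non-empty rows
-- are exactly the descending-sorted first components
theorem heads_of_sorted (c : List (List Int)) :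
    (PySem.List.sorted (c.filter (fun x => !x.isEmpty)) (fun x => x) true).map
        (fun x => PySem.List.pyGetD x 0 0) =
      PySem.List.sorted
        ((c.filter (fun x => !x.isEmpty)).map (fun x => PySem.List.pyGetD x 0 0))
        (fun x => x) true := by
  symm
  apply sorted_rev_id_unique
  · exact (PySem.List.sorted_perm _ _ _).map _
  · rw [List.pairwise_map]
    refine List.Pairwise.imp_of_mem ?_
      (sortedLL_pairwise_rev (c.filter (fun x => !x.isEmpty)))
    intro x y hxmem hymem hle
    have hx : x ≠ [] := by
      have := (List.mem_filter.mp ((PySem.List.mem_sorted _ _ _ _).mp hxmem)).2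
      simpa [List.isEmpty_iff] using this
    have hy : y ≠ [] := by
      have := (List.mem_filter.mp ((PySem.List.mem_sorted _ _ _ _).mp hymem)).2
      simpa [List.isEmpty_iff] using this
    exact head_mono x y hx hy hle

-- A's indexing loop is the sum of the first n entries' heads of the sorted list
theorem loop_eq_sum (xs : List (List Int)) (n : Int) (h0 : 0 ≤ n)
    (h : n ≤ (xs.length : Int)) :
    (PySem.List.pyRange 0 n 1).foldl
        (fun free i => free + PySem.List.pyGetD (PySem.List.pyGetD xs i []) 0 0) 0 =
      ((xs.take n.toNat).map (fun x => PySem.List.pyGetD x 0 0)).sum := by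
  rw [PySem.List.foldl_add _ (fun i => PySem.List.pyGetD (PySem.List.pyGetD xs i []) 0 0) 0,
    zero_add]
  congr 1
  obtain ⟨k, rfl⟩ : ∃ k : Nat, n = (k : Int) := ⟨n.toNat, (Int.toNat_of_nonneg h0).symm⟩
  rw [Int.toNat_natCast]
  have hk : k ≤ xs.length := by exact_mod_cast h
  clear h0 h
  induction k with
  | zero => simp [PySem.List.pyRange_one_eq_nil]
  | succ k ih =>
    have hk' : k ≤ xs.length := Nat.le_of_succ_le hk
    have hlt : k < xs.length := hk
    have hsplit : PySem.List.pyRange 0 ((k : Int) + 1) 1 =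
        PySem.List.pyRange 0 (k : Int) 1 ++ [(k : Int)] := by
      exact PySem.List.pyRange_one_succ_right (by exact_mod_cast Nat.zero_le k)
    have hcast : ((k + 1 : Nat) : Int) = (k : Int) + 1 := by push_cast; ring
    rw [hcast, hsplit, List.map_append, ih hk', List.take_add_one, List.map_append]
    congr 1
    have hget : PySem.List.pyGetD xs (k : Int) [] = xs[k] := by
      rw [PySem.List.pyGetD_eq_getElem]
      · simp
      · exact_mod_cast Nat.zero_le k
      · exact_mod_cast hlt
    simp [hget, List.getElem?_eq_getElem hlt]

-- extracting the max peels the head of the descending sort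
theorem sortDesc_cons (pool : List Int) (h : pool ≠ []) :
    ∃ t, PySem.List.sorted pool (fun y => y) true =
           ((PySem.List.max? pool (fun y => y)).getD 0) :: t ∧
         PySem.List.sorted (pool.erase ((PySem.List.max? pool (fun y => y)).getD 0))
           (fun y => y) true = t := by
  obtain ⟨v, hv⟩ : ∃ v, PySem.List.max? pool (fun y => y) = some v := by
    cases hm : PySem.List.max? pool (fun y => y) with
    | none => exact absurd ((PySem.List.max?_eq_none_iff pool fun y => y).mp hm) h
    | some v => exact ⟨v, rfl⟩
  have hperm := PySem.List.sorted_perm pool (fun y => y) true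
  have hsne : PySem.List.sorted pool (fun y => y) true ≠ [] := by
    intro hnil
    rw [hnil] at hperm
    exact h hperm.symm.eq_nil
  obtain ⟨hd, t, hs⟩ := List.exists_cons_of_ne_nil hsne
  have hpair := PySem.List.sorted_pairwise_rev pool (fun y => y)
  rw [hs] at hpair hperm
  have hhd : hd = v := by
    have h1 : hd ≤ v :=
      PySem.List.max?_isMax hv hd (hperm.mem_iff.mp (List.mem_cons_self))
    have h2 : v ≤ hd := by
      have hvmem : v ∈ hd :: t := hperm.mem_iff.mpr (PySem.List.max?_mem hv)
      rcases List.mem_cons.mp hvmem with rfl | hvt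
      · exact le_rfl
      · exact (List.pairwise_cons.mp hpair).1 v hvt
    exact le_antisymm h1 h2
  refine ⟨t, ?_, ?_⟩
  · rw [hs, hhd, hv]; rfl
  · rw [hv]
    apply sorted_rev_id_unique
    · have h3 := (hperm.erase v).symm
      rw [hhd, List.erase_cons_head] at h3
      simpa using h3.symm
    · exact (List.pairwise_cons.mp hpair).2

-- one extraction step on a non-empty pool
theorem stepB_spec (free : Int) (pool : List Int) (h : pool ≠ []) :
    stepB (free, pool) =
      (free + (PySem.List.max? pool (fun y => y)).getD 0,
       pool.erase ((PySem.List.max? pool (fun y => y)).getD 0)) := by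
  obtain ⟨v, hv⟩ : ∃ v, PySem.List.max? pool (fun y => y) = some v := by
    cases hm : PySem.List.max? pool (fun y => y) with
    | none => exact absurd ((PySem.List.max?_eq_none_iff pool fun y => y).mp hm) h
    | some v => exact ⟨v, rfl⟩
  have hvmem : v ∈ pool := PySem.List.max?_mem hv
  simp [stepB, hv, PySem.List.remove?_eq_some_erase _ _ hvmem]

-- k extractions sum the k largest elements
theorem iterate_sum (k : Nat) : ∀ (pool : List Int) (free : Int), k ≤ pool.length →
    (stepB^[k] (free, pool)).1 =
      free + ((PySem.List.sorted pool (fun y => y) true).take k).sum := by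
  induction k with
  | zero => intro pool free _; simp
  | succ k ih =>
    intro pool free hk
    have hne : pool ≠ [] := by
      intro h; rw [h] at hk; simp at hk
    obtain ⟨t, hs, he⟩ := sortDesc_cons pool hne
    have hlen : k ≤ (pool.erase ((PySem.List.max? pool (fun y => y)).getD 0)).length := by
      have h1 : t.length + 1 = pool.length := by
        have := congrArg List.length hs
        simpa [PySem.List.length_sorted] using this.symm
      have h2 : t.length = (pool.erase ((PySem.List.max? pool (fun y => y)).getD 0)).length := by
        have := congrArg List.length he
        simpa [PySem.List.length_sorted] using this.symm
      omega
    rw [Function.iterate_succ_apply, stepB_spec free pool hne, ih _ _ hlen, he, hs]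
    simp [List.take_succ_cons]
    ring

-- ===== VERDICT (by name: the statement is the Claim_ definition above) =====
theorem solve_spec : Claim_equal_solve := by
  intro n m c _ hpre
  unfold Spec_solve solve solve_alt
  have hpre' : n ≤ ((c.filter (fun x => !x.isEmpty)).length : Int) := hpre
  by_cases hn : 0 ≤ n
  · -- both frees equal the sum of the n largest heads
    have hlenA : n ≤ ((PySem.List.sorted c (fun x => x) true).length : Int) := by
      rw [PySem.List.length_sorted]
      have : ((c.filter (fun x => !x.isEmpty)).length : Int) ≤ (c.length : Int) := by
        exact_mod_cast List.length_filter_le _ _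
      omega
    have hA : (PySem.List.pyRange 0 n 1).foldl
        (fun free i => free +
          PySem.List.pyGetD (PySem.List.pyGetD (PySem.List.sorted c (fun x => x) true) i []) 0 0) 0 =
        ((PySem.List.sorted
            ((c.filter (fun x => !x.isEmpty)).map (fun x => PySem.List.pyGetD x 0 0))
            (fun x => x) true).take n.toNat).sum := by
      rw [loop_eq_sum _ n hn hlenA, sorted_rev_filter_split]
      have htk : n.toNat ≤
          (PySem.List.sorted (c.filter (fun x => !x.isEmpty)) (fun x => x) true).length := by
        rw [PySem.List.length_sorted]; omega
      rw [List.take_append_of_le_length htk, List.map_take, heads_of_sorted]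
    have hlenR : (PySem.List.pyRange 0 n 1).length = n.toNat := by
      rw [PySem.List.length_pyRange_one]; simp
    have hB : (PySem.List.pyRange 0 n 1).foldl
        (fun (st : Int × List Int) _ =>
          let b := (PySem.List.max? st.2 (fun y => y)).getD 0
          (st.1 + b, (PySem.List.remove? st.2 b).getD st.2))
        (0, (c.filter (fun x => !x.isEmpty)).map (fun x => PySem.List.pyGetD x 0 0)) =
        stepB^[n.toNat] (0, (c.filter (fun x => !x.isEmpty)).map (fun x => PySem.List.pyGetD x 0 0)) := by
      rw [← hlenR]
      exact foldl_const_iterate stepB _ _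
    have hkle : n.toNat ≤
        ((c.filter (fun x => !x.isEmpty)).map (fun x => PySem.List.pyGetD x 0 0)).length := by
      rw [List.length_map]; omega
    have hit := iterate_sum n.toNat
      ((c.filter (fun x => !x.isEmpty)).map (fun x => PySem.List.pyGetD x 0 0)) 0 hkle
    simp only [hA, hB, hit, zero_add]
  · -- n < 0: both loops are empty, both frees are 0
    have hr : PySem.List.pyRange 0 n 1 = [] :=
      PySem.List.pyRange_one_eq_nil (by omega)
    simp only [hr, List.foldl_nil]
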